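-- pv_equiv track=rewrite | github.com/arbalest339/KG-ORE | test.py | zh_metrics
-- ===== SOURCE A (Python) =====
-- def zh_metrics(gold, tag_seq):
--     positive_true = 0
--     positive_false = 0
--     negative_false = 0
--
--     for g, t in zip(gold, tag_seq):
--         if g == t and g != 0:
--             positive_true += 1
--         elif t != 0 and g != t:
--             positive_false += 1
--         elif g != 0:
--             negative_false += 1
--
--     return positive_true, positive_false, negative_false
-- ===== SOURCE B (Python) =====
-- def zh_metrics(gold, tag_seq):
--     pairs = list(zip(gold, tag_seq))
--     positive_true = sum(1 for g, t in pairs if g == t and g != 0)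
--     positive_false = sum(1 for g, t in pairs if t != 0 and g != t)
--     negative_false = sum(1 for g, t in pairs if t == 0 and g != 0)
--     return positive_true, positive_false, negative_false
-- ===== Notes on version B (the rewrite author's own statement) =====
-- stated objective: alternative
-- what changed: The single branching accumulator loop is replaced by three independent passes over the zipped pairs, each counting one category with a flattened predicate (FN becomes t==0 and g!=0 instead of falling through the elif chain).
import Mathlib
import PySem

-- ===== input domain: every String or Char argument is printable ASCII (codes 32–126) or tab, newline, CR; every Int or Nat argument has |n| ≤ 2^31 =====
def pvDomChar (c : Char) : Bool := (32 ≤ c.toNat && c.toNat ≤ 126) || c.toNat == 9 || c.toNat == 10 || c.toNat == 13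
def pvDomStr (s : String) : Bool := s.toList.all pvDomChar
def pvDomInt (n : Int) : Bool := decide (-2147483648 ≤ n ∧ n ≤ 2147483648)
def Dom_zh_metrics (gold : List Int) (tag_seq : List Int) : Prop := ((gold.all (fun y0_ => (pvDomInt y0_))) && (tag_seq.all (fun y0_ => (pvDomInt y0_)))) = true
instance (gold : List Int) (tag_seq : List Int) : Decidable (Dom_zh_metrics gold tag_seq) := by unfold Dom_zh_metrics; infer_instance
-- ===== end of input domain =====

-- B replaces A's single branching accumulator loop by three independent counting passes
-- over the zipped pairs, one flattened predicate per category (alternative decomposition, same cost).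

-- ===== PORT A =====
-- A: one pass over zip(gold, tag_seq) with an if/elif/elif chain updating three counters.
def zh_metrics (gold : List Int) (tag_seq : List Int) : Int × Int × Int :=
  (List.zip gold tag_seq).foldl
    (fun (acc : Int × Int × Int) (p : Int × Int) =>
      let (pt, pf, nf) := acc
      let (g, t) := p
      if g == t && g != 0 then (pt + 1, pf, nf)
      else if t != 0 && g != t then (pt, pf + 1, nf)
      else if g != 0 then (pt, pf, nf + 1)
      else (pt, pf, nf))
    (0, 0, 0)

-- ===== PORT B =====
-- B: three independent passes over the zipped pairs, one flattened predicate per category.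
def zh_metrics_alt (gold : List Int) (tag_seq : List Int) : Int × Int × Int :=
  let pairs := List.zip gold tag_seq
  ((pairs.countP (fun p => p.1 == p.2 && p.1 != 0) : Int),
   (pairs.countP (fun p => p.2 != 0 && p.1 != p.2) : Int),
   (pairs.countP (fun p => p.2 == 0 && p.1 != 0) : Int))

-- ===== PRECONDITION & SPEC =====
def Spec_zh_metrics (gold : List Int) (tag_seq : List Int) (out : Int × Int × Int) : Prop := out = zh_metrics_alt gold tag_seq
instance (gold : List Int) (tag_seq : List Int) (out : Int × Int × Int) : Decidable (Spec_zh_metrics gold tag_seq out) := by unfold Spec_zh_metrics; infer_instance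

-- ===== CLAIM (what is proved, stated in full; the proofs are below) =====
def Claim_equal_zh_metrics : Prop := ∀ (gold : List Int) (tag_seq : List Int), Dom_zh_metrics gold tag_seq → Spec_zh_metrics gold tag_seq (zh_metrics gold tag_seq)

-- ===== LEMMAS AND PROOFS =====

-- ===== VERDICT (by name: the statement is the Claim_ definition above) =====
theorem zh_fold_eq (l : List (Int × Int)) (pt pf nf : Int) :
    l.foldl
      (fun (acc : Int × Int × Int) (p : Int × Int) =>
        let (pt, pf, nf) := acc
        let (g, t) := p
        if g == t && g != 0 then (pt + 1, pf, nf)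
        else if t != 0 && g != t then (pt, pf + 1, nf)
        else if g != 0 then (pt, pf, nf + 1)
        else (pt, pf, nf))
      (pt, pf, nf)
    = (pt + (l.countP (fun p => p.1 == p.2 && p.1 != 0) : Int),
       pf + (l.countP (fun p => p.2 != 0 && p.1 != p.2) : Int),
       nf + (l.countP (fun p => p.2 == 0 && p.1 != 0) : Int)) := by
  induction l generalizing pt pf nf with
  | nil => simp
  | cons hd tl ih =>
    obtain ⟨g, t⟩ := hd
    rw [List.foldl_cons]
    by_cases h1 : g = t
    · by_cases h2 : g = 0
      · have ht : t = 0 := h1 ▸ h2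
        have hstep : (if g == t && g != 0 then (pt + 1, pf, nf)
            else if t != 0 && g != t then (pt, pf + 1, nf)
            else if g != 0 then (pt, pf, nf + 1)
            else (pt, pf, nf) : Int × Int × Int) = (pt, pf, nf) := by
          simp [h1, h2, ht]
        simp only [hstep, ih, List.countP_cons]
        simp [h1, h2, ht]
      · have ht : t ≠ 0 := h1 ▸ h2
        have hstep : (if g == t && g != 0 then (pt + 1, pf, nf)
            else if t != 0 && g != t then (pt, pf + 1, nf)
            else if g != 0 then (pt, pf, nf + 1)
            else (pt, pf, nf) : Int × Int × Int) = (pt + 1, pf, nf) := by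
          simp [h1, h2, ht]
        simp only [hstep, ih, List.countP_cons]
        simp [h1, h2, ht]
        push_cast
        ring
    · by_cases h3 : t = 0
      · have hg : g ≠ 0 := fun hz => h1 (hz.trans h3.symm)
        have hstep : (if g == t && g != 0 then (pt + 1, pf, nf)
            else if t != 0 && g != t then (pt, pf + 1, nf)
            else if g != 0 then (pt, pf, nf + 1)
            else (pt, pf, nf) : Int × Int × Int) = (pt, pf, nf + 1) := by
          simp [h1, h3, hg]
        simp only [hstep, ih, List.countP_cons]
        simp [h1, h3, hg]
        push_cast
        ring
      · have hstep : (if g == t && g != 0 then (pt + 1, pf, nf)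
            else if t != 0 && g != t then (pt, pf + 1, nf)
            else if g != 0 then (pt, pf, nf + 1)
            else (pt, pf, nf) : Int × Int × Int) = (pt, pf + 1, nf) := by
          simp [h1, h3]
        simp only [hstep, ih, List.countP_cons]
        simp [h1, h3]
        push_cast
        ring

theorem zh_metrics_spec : Claim_equal_zh_metrics := by
  intro gold tag_seq _
  unfold Spec_zh_metrics zh_metrics zh_metrics_alt
  simpa using zh_fold_eq (List.zip gold tag_seq) 0 0 0
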